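-- pv_equiv track=rewrite | github.com/dwhitlockii/NoSleep-Ops | ml_analytics/ai_threat_hunter.py | _analyze_attack_sequences
-- ===== SOURCE A (Python) =====
-- from collections import defaultdict, Counter
-- from typing import Dict, List, Tuple, Any
--
-- def _analyze_attack_sequences(attacks: List[Tuple]) -> List[List[str]]:
--     """Analyze attack sequences for kill chain patterns"""
--     sequences = []
--
--     # Group attacks by IP and analyze sequences
--     ip_attacks = defaultdict(list)
--     for attack in attacks:
--         ip_attacks[attack[1]].append(attack)
--
--     for ip, ip_attack_list in ip_attacks.items():
--         if len(ip_attack_list) > 2: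
--             sequence = [attack[0] for attack in sorted(ip_attack_list, key=lambda x: x[3])]
--             sequences.append(sequence)
--
--     return sequences
-- ===== SOURCE B (Python) =====
-- from collections import Counter
--
-- def _analyze_attack_sequences(attacks):
--     counts = Counter(a[1] for a in attacks)
--     big = [a for a in attacks if counts[a[1]] > 2]
--     order = list(dict.fromkeys(a[1] for a in big))
--     groups = {ip: [] for ip in order}
--     for a in sorted(big, key=lambda x: x[3]):
--         groups[a[1]].append(a[0])
--     return [groups[ip] for ip in order]
-- ===== Notes on version B (the rewrite author's own statement) =====
-- stated objective: alternative
-- what changed: A sorts each IP's group separately inside a group-then-filter loop; B counts IPs once, keeps only rows of IPs occurring more than twice, performs ONE global stable sort by timestamp and distributes actions into per-IP groups read out in first-appearance order.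
import Mathlib
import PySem

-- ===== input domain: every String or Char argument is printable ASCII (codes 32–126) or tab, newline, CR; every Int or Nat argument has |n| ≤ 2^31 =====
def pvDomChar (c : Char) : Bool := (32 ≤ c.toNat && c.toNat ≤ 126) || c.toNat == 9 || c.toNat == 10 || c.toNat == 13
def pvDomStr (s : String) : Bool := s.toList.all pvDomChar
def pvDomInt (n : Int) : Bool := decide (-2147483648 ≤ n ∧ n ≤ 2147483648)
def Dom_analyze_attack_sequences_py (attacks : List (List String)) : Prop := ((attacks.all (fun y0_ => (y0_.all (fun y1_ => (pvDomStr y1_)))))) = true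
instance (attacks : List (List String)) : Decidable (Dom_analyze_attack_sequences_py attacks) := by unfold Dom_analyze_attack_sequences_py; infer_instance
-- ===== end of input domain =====

-- B replaces A's per-IP sorts by one Counter prefilter, one global stable sort and one grouping pass (alternative decomposition, same results).

-- ===== PORT A =====
-- group attacks by attack[1] into a defaultdict(list), then for each group of size > 2 emit the actions sorted by attack[3]
def analyze_attack_sequences_py (attacks : List (List String)) : List (List String) :=
  let ip_attacks : PySem.Dict String (List (List String)) :=
    attacks.foldl (fun d attack => d.modify (PySem.List.pyGetD attack 1 "") [] (fun v => v ++ [attack])) PySem.Dict.empty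
  ip_attacks.items.foldl (fun sequences kv =>
    if 2 < kv.2.length then
      sequences ++ [(PySem.List.sorted kv.2 (fun x => PySem.List.pyGetD x 3 "")).map (fun a => PySem.List.pyGetD a 0 "")]
    else sequences) []

-- ===== PORT B =====
-- Counter of IPs; keep rows of big IPs; first-appearance IP order; one global stable sort; group actions; read groups in order
def analyze_attack_sequences_py_alt (attacks : List (List String)) : List (List String) :=
  let counts : PySem.Dict String Int := PySem.Dict.counter (attacks.map (fun a => PySem.List.pyGetD a 1 ""))
  let big : List (List String) := attacks.filter (fun a => decide (2 < counts.getD (PySem.List.pyGetD a 1 "") 0))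
  let order : List String := PySem.List.dedup (big.map (fun a => PySem.List.pyGetD a 1 ""))
  let groups : PySem.Dict String (List String) :=
    (PySem.List.sorted big (fun x => PySem.List.pyGetD x 3 "")).foldl
      (fun d a => d.modify (PySem.List.pyGetD a 1 "") [] (fun v => v ++ [PySem.List.pyGetD a 0 ""]))
      (order.foldl (fun d k => d.insert k []) PySem.Dict.empty)
  order.map (fun k => groups.getD k [])

-- ===== PRECONDITION & SPEC =====
-- Pre_ excludes exactly the inputs on which the Python A raises IndexError: a row shorter than 2 (attack[1]),
-- or a row shorter than 4 in a group of more than 2 rows sharing its IP (attack[3]/attack[0]).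
def Pre_analyze_attack_sequences_py (attacks : List (List String)) : Prop :=
  ∀ row ∈ attacks, 2 ≤ row.length ∧
    (2 < attacks.countP (fun r => PySem.List.pyGetD r 1 "" == PySem.List.pyGetD row 1 "") → 4 ≤ row.length)
instance (attacks : List (List String)) : Decidable (Pre_analyze_attack_sequences_py attacks) := by unfold Pre_analyze_attack_sequences_py; infer_instance
def pvWitness_analyze_attack_sequences_py : List (List String) :=
  [["scan", "1.2.3.4", "web", "t1"], ["brute", "1.2.3.4", "web", "t3"], ["exploit", "1.2.3.4", "web", "t2"], ["ping", "5.6.7.8"]]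

def Spec_analyze_attack_sequences_py (attacks : List (List String)) (out : List (List String)) : Prop := out = analyze_attack_sequences_py_alt attacks
instance (attacks : List (List String)) (out : List (List String)) : Decidable (Spec_analyze_attack_sequences_py attacks out) := by unfold Spec_analyze_attack_sequences_py; infer_instance

-- ===== CLAIM (what is proved, stated in full; the proofs are below) =====
def Claim_equal_analyze_attack_sequences_py : Prop := ∀ (attacks : List (List String)), Dom_analyze_attack_sequences_py attacks → Pre_analyze_attack_sequences_py attacks → Spec_analyze_attack_sequences_py attacks (analyze_attack_sequences_py attacks)

-- ===== LEMMAS AND PROOFS =====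

-- x goes in front when it sorts before everything in the list
theorem insertBy_of_forall_before {α : Type} (bef : α → α → Bool) (x : α) (l : List α)
    (h : ∀ z ∈ l, bef x z = true) : PySem.List.insertBy bef x l = x :: l := by
  cases l with
  | nil => rfl
  | cons y ys => simp [PySem.List.insertBy, h y (by simp)]

-- filtering commutes with stable insertion into a key-sorted list
theorem filter_insertBy {α κ : Type} [LinearOrder κ] (key : α → κ) (p : α → Bool) (x : α) (l : List α)
    (h : l.Pairwise (fun a b => key a ≤ key b)) :
    (PySem.List.insertBy (fun a b => decide (key a < key b)) x l).filter p
      = if p x then PySem.List.insertBy (fun a b => decide (key a < key b)) x (l.filter p) else l.filter p := by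
  induction l with
  | nil => simp [PySem.List.insertBy, List.filter_cons]
  | cons y ys ih =>
    rcases List.pairwise_cons.mp h with ⟨h1, h2⟩
    by_cases hb : key x < key y
    · have hall : ∀ z ∈ (y :: ys).filter p, decide (key x < key z) = true := by
        intro z hz
        have hz' := List.mem_of_mem_filter hz
        rcases List.mem_cons.mp hz' with rfl | hz''
        · simpa using hb
        · simpa using lt_of_lt_of_le hb (h1 z hz'')
      have hins := insertBy_of_forall_before (fun a b => decide (key a < key b)) x ((y :: ys).filter p) hall
      simp only [PySem.List.insertBy, hb, decide_true, if_true]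
      rw [hins]
      by_cases hp : p x <;> simp [List.filter_cons, hp]
    · simp only [PySem.List.insertBy, hb, decide_false, Bool.false_eq_true, if_false]
      by_cases hp : p x
      · by_cases hpy : p y
        · simp [hpy, ih h2, hp, PySem.List.insertBy, hb]
        · simp [hpy, ih h2, hp]
      · by_cases hpy : p y <;> simp [hpy, ih h2, hp]

theorem sorted_append_singleton {α κ : Type} [LT κ] [DecidableLT κ] (xs : List α) (x : α) (key : α → κ) :
    PySem.List.sorted (xs ++ [x]) key
      = PySem.List.insertBy (fun a b => decide (key a < key b)) x (PySem.List.sorted xs key) := by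
  rw [PySem.List.sorted_eq_foldl_insertBy, PySem.List.sorted_eq_foldl_insertBy, List.foldl_append]
  rfl

-- a stable sort commutes with filtering
theorem filter_sorted {α κ : Type} [LinearOrder κ] (key : α → κ) (p : α → Bool) (xs : List α) :
    (PySem.List.sorted xs key).filter p = PySem.List.sorted (xs.filter p) key := by
  induction xs using List.reverseRecOn with
  | nil => rfl
  | append_singleton xs x ih =>
    rw [sorted_append_singleton, List.filter_append,
        filter_insertBy key p x _ (PySem.List.sorted_pairwise xs key), ih]
    by_cases hp : p x
    · simp [hp, sorted_append_singleton]
    · simp [hp]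

theorem ofList_append_singleton {α : Type} [BEq α] (xs : List α) (x : α) :
    PySem.Set.ofList (xs ++ [x]) = PySem.Set.add (PySem.Set.ofList xs) x := by
  simp [PySem.Set.ofList_eq_foldl, List.foldl_append]

-- ordered dedup commutes with filtering
theorem ofList_filter {α : Type} [BEq α] [LawfulBEq α] (p : α → Bool) (xs : List α) :
    PySem.Set.ofList (xs.filter p) = (PySem.Set.ofList xs).filter p := by
  induction xs using List.reverseRecOn with
  | nil => rfl
  | append_singleton xs x ih =>
    rw [List.filter_append, ofList_append_singleton]
    by_cases hp : p x <;> by_cases hmem : x ∈ xs <;>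
      simp [hp, hmem, ofList_append_singleton, ih, PySem.Set.add, PySem.Set.contains,
            List.filter_append, List.mem_filter, PySem.Set.mem_ofList]

-- the groups dict of port B starts out with empty lists everywhere
theorem getD_foldl_insert_nil (l : List String) (c : String) :
    ((l.foldl (fun d k => d.insert k ([] : List String)) PySem.Dict.empty).getD c []) = [] := by
  induction l using List.reverseRecOn with
  | nil => simp [PySem.Dict.getD_empty]
  | append_singleton l x ih =>
    rw [List.foldl_append]
    simp only [List.foldl_cons, List.foldl_nil, PySem.Dict.getD_insert]
    split <;> simp [ih]

-- canonical form of port A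
theorem A_canon (attacks : List (List String)) :
    analyze_attack_sequences_py attacks
      = ((PySem.Set.ofList (attacks.map (fun a => PySem.List.pyGetD a 1 ""))).filter
            (fun c => decide (2 < (attacks.filter (fun r => PySem.List.pyGetD r 1 "" == c)).length))).map
          (fun c => (PySem.List.sorted (attacks.filter (fun r => PySem.List.pyGetD r 1 "" == c))
              (fun x => PySem.List.pyGetD x 3 "")).map (fun a => PySem.List.pyGetD a 0 "")) := by
  unfold analyze_attack_sequences_py
  dsimp only
  have hkeys :
      (attacks.foldl (fun d attack => d.modify (PySem.List.pyGetD attack 1 "") [] (fun v => v ++ [attack]))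
          (PySem.Dict.empty : PySem.Dict String (List (List String)))).keys
        = PySem.Set.ofList (attacks.map (fun a => PySem.List.pyGetD a 1 "")) := by
    rw [PySem.Dict.keys_foldl_modify_key attacks (fun a => PySem.List.pyGetD a 1 "") []
        (fun _ a => (fun v => v ++ [a])) PySem.Dict.empty]
    rfl
  have hnodup :
      (attacks.foldl (fun d attack => d.modify (PySem.List.pyGetD attack 1 "") [] (fun v => v ++ [attack]))
          (PySem.Dict.empty : PySem.Dict String (List (List String)))).keys.Nodup := by
    exact PySem.Dict.nodup_keys_foldl_modify_key attacks (fun a => PySem.List.pyGetD a 1 "") []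
      (fun _ a => (fun v => v ++ [a])) PySem.Dict.empty (by simp [PySem.Dict.keys_empty])
  have hgetD : ∀ c,
      (attacks.foldl (fun d attack => d.modify (PySem.List.pyGetD attack 1 "") [] (fun v => v ++ [attack]))
          (PySem.Dict.empty : PySem.Dict String (List (List String)))).getD c []
        = attacks.filter (fun r => PySem.List.pyGetD r 1 "" == c) := by
    intro c
    have := PySem.Dict.getD_foldl_modify_append
      (attacks.map (fun a => ((PySem.List.pyGetD a 1 ""), a))) (PySem.Dict.empty) c
    rw [List.foldl_map] at this
    simp only [this, PySem.Dict.getD_empty, List.nil_append, List.filter_map, List.map_map]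
    simp [Function.comp_def]
  rw [PySem.Dict.items_eq_map_keys _ hnodup [], hkeys]
  rw [PySem.List.foldl_append_ite (p := fun kv : String × List (List String) => 2 < kv.2.length)
      (f := fun kv => (PySem.List.sorted kv.2 (fun x => PySem.List.pyGetD x 3 "")).map (fun a => PySem.List.pyGetD a 0 ""))]
  rw [List.filter_map, List.map_map]
  simp only [Function.comp_def, hgetD, List.nil_append]

-- canonical form of port B
theorem B_canon (attacks : List (List String)) :
    analyze_attack_sequences_py_alt attacks
      = (PySem.Set.ofList ((attacks.filter (fun a =>
            decide ((2 : Int) < ((attacks.map (fun a => PySem.List.pyGetD a 1 "")).count (PySem.List.pyGetD a 1 "") : Int)))).map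
              (fun a => PySem.List.pyGetD a 1 ""))).map
          (fun c => ((PySem.List.sorted (attacks.filter (fun a =>
              decide ((2 : Int) < ((attacks.map (fun a => PySem.List.pyGetD a 1 "")).count (PySem.List.pyGetD a 1 "") : Int))))
              (fun x => PySem.List.pyGetD x 3 "")).filter (fun a => PySem.List.pyGetD a 1 "" == c)).map
            (fun a => PySem.List.pyGetD a 0 "")) := by
  unfold analyze_attack_sequences_py_alt
  dsimp only
  simp only [PySem.Dict.getD_counter, PySem.List.dedup]
  apply List.map_congr_left
  intro c _
  have hbase := getD_foldl_insert_nil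
    (PySem.Set.ofList ((attacks.filter (fun a =>
        decide ((2 : Int) < ((attacks.map (fun a => PySem.List.pyGetD a 1 "")).count (PySem.List.pyGetD a 1 "") : Int)))).map
          (fun a => PySem.List.pyGetD a 1 ""))) c
  have := PySem.Dict.getD_foldl_modify_append
    ((PySem.List.sorted (attacks.filter (fun a =>
        decide ((2 : Int) < ((attacks.map (fun a => PySem.List.pyGetD a 1 "")).count (PySem.List.pyGetD a 1 "") : Int))))
        (fun x => PySem.List.pyGetD x 3 "")).map (fun a => ((PySem.List.pyGetD a 1 ""), PySem.List.pyGetD a 0 "")))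
    ((PySem.Set.ofList ((attacks.filter (fun a =>
        decide ((2 : Int) < ((attacks.map (fun a => PySem.List.pyGetD a 1 "")).count (PySem.List.pyGetD a 1 "") : Int)))).map
          (fun a => PySem.List.pyGetD a 1 ""))).foldl (fun d k => d.insert k []) PySem.Dict.empty) c
  rw [List.foldl_map] at this
  rw [this, hbase, List.nil_append, List.filter_map, List.map_map]
  simp [Function.comp_def]

-- ===== VERDICT (by name: the statement is the Claim_ definition above) =====
theorem analyze_attack_sequences_py_spec : Claim_equal_analyze_attack_sequences_py := by
  intro attacks _ _
  unfold Spec_analyze_attack_sequences_py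
  rw [A_canon, B_canon]
  have hcond : ∀ a : List String,
      (decide ((2 : Int) < ((attacks.map (fun a => PySem.List.pyGetD a 1 "")).count (PySem.List.pyGetD a 1 "") : Int)))
        = (decide (2 < (attacks.filter (fun r => PySem.List.pyGetD r 1 "" == PySem.List.pyGetD a 1 "")).length)) := by
    intro a
    have h1 : ((attacks.map (fun a => PySem.List.pyGetD a 1 "")).count (PySem.List.pyGetD a 1 ""))
        = (attacks.filter (fun r => PySem.List.pyGetD r 1 "" == PySem.List.pyGetD a 1 "")).length := by
      rw [List.count_eq_countP, List.countP_map, ← List.countP_eq_length_filter]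
      rfl
    rw [h1]
    simp
  have hmap : ((attacks.filter (fun a =>
        decide ((2 : Int) < ((attacks.map (fun a => PySem.List.pyGetD a 1 "")).count (PySem.List.pyGetD a 1 "") : Int)))).map
          (fun a => PySem.List.pyGetD a 1 ""))
      = (attacks.map (fun a => PySem.List.pyGetD a 1 "")).filter
          (fun c => decide (2 < (attacks.filter (fun r => PySem.List.pyGetD r 1 "" == c)).length)) := by
    rw [List.filter_map]
    exact congrArg _ (List.filter_congr (fun a _ => hcond a))
  rw [hmap, ofList_filter]
  apply List.map_congr_left
  intro c hc
  have hcmem := List.mem_filter.mp hc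
  have hcount : 2 < (attacks.filter (fun r => PySem.List.pyGetD r 1 "" == c)).length := by
    simpa using hcmem.2
  rw [filter_sorted]
  have hbig : ((attacks.filter (fun a =>
        decide ((2 : Int) < ((attacks.map (fun a => PySem.List.pyGetD a 1 "")).count (PySem.List.pyGetD a 1 "") : Int)))).filter
          (fun a => PySem.List.pyGetD a 1 "" == c))
      = attacks.filter (fun r => PySem.List.pyGetD r 1 "" == c) := by
    rw [List.filter_comm, List.filter_filter]
    apply List.filter_congr
    intro a _
    by_cases h : PySem.List.pyGetD a 1 "" == c
    · have hc' : PySem.List.pyGetD a 1 "" = c := by simpa using h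
      have hca := hcond a
      rw [hc'] at hca
      have hX := (decide_eq_decide.mp hca).mpr hcount
      rw [hc']
      have hX' : 2 < List.count c (List.map (fun a => PySem.List.pyGetD a 1 "") attacks) := by
        exact_mod_cast hX
      simp [hX']
    · simp [h]
  rw [hbig]
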